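-- pv_equiv track=rewrite | github.com/islamgeniy/projects | dm-codes/b_base_expansion.py | base_expansion
-- ===== SOURCE A (Python) =====
-- def base_expansion(n, b):
--     """
--     Construct base b expansion of n (where b > 1)
--     Returns the digits a_k-1, ..., a_1, a_0 and the count k
--     """
--     q = n
--     k = 0
--     a = []
--
--     while q != 0:
--         a.append(q % b)
--         q = q // b
--         k = k + 1
--
--     # Reverse to get a_k-1, ..., a_1, a_0
--     return a[::-1], k
-- ===== SOURCE B (Python) =====
-- def base_expansion(n, b):
--     """
--     Construct base b expansion of n (where b > 1)
--     Returns the digits a_k-1, ..., a_1, a_0 and the count k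
--     """
--     # Recursive decomposition: the digits of n are the digits of n//b
--     # followed by n % b, built most-significant-first with no reversal.
--     if n == 0:
--         return [], 0
--     digits, k = base_expansion(n // b, b)
--     digits.append(n % b)
--     return digits, k + 1
-- ===== Notes on version B (the rewrite author's own statement) =====
-- stated objective: simpler
-- what changed: Replaces the while-loop with accumulator, counter and final reversal by a direct structural recursion on n//b that builds the digit list most-significant-first, so no reversal or mutable state is needed.
-- outside the precondition, e.g. on base_expansion(5, 0): A raises ZeroDivisionError, B raises ZeroDivisionError; on base_expansion(-3, 2): A does not finish within the time limit, B raises RecursionError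
import Mathlib
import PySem

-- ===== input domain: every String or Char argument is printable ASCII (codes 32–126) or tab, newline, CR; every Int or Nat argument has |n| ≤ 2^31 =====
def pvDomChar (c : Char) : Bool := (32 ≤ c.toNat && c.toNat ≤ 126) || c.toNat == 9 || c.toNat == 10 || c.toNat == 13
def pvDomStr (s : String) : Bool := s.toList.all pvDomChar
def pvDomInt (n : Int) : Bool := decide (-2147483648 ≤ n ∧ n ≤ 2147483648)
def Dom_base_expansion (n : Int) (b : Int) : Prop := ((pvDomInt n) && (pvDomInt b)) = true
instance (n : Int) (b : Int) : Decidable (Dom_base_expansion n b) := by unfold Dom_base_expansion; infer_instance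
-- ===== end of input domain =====

-- B builds the digits most-significant-first by recursion on n//b instead of A's
-- loop + append + reverse; return values proved equal on all of Pre_ (no speed claim).

-- ===== PORT A =====
-- A's while loop, fuel-totalized (fuel 100 exceeds any chain length on Dom inside Pre_);
-- a[::-1] is exactly List.reverse.
def baseExpLoopA (b : Int) : Nat → Int → Int → List Int → List Int × Int
  | 0, _, k, a => (a.reverse, k)
  | fuel + 1, q, k, a =>
      if q ≠ 0 then
        baseExpLoopA b fuel (PySem.Int.floordiv q b) (k + 1) (a ++ [PySem.Int.mod q b])
      else (a.reverse, k)

def base_expansion (n : Int) (b : Int) : List Int × Int :=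
  baseExpLoopA b 100 n 0 []

-- ===== PORT B =====
-- B's recursion, fuel-totalized with the same fuel bound.
def baseExpRecB (b : Int) : Nat → Int → List Int × Int
  | 0, _ => ([], 0)
  | fuel + 1, n =>
      if n = 0 then ([], 0)
      else
        let r := baseExpRecB b fuel (PySem.Int.floordiv n b)
        (r.1 ++ [PySem.Int.mod n b], r.2 + 1)

def base_expansion_alt (n : Int) (b : Int) : List Int × Int :=
  baseExpRecB b 100 n

-- ===== PRECONDITION & SPEC =====
-- Pre_ excludes exactly where Python A does not return: b = 0 with n ≠ 0 raises
-- ZeroDivisionError, and b ∈ {-1, 1} with n ≠ 0 or b ≥ 2 with n < 0 loop forever.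
def Pre_base_expansion (n : Int) (b : Int) : Prop :=
  n = 0 ∨ b ≤ -2 ∨ (2 ≤ b ∧ 0 ≤ n)
instance (n : Int) (b : Int) : Decidable (Pre_base_expansion n b) := by
  unfold Pre_base_expansion; infer_instance

def pvWitness_base_expansion : Int × Int := (10, 2)

def Spec_base_expansion (n : Int) (b : Int) (out : List Int × Int) : Prop := out = base_expansion_alt n b
instance (n : Int) (b : Int) (out : List Int × Int) : Decidable (Spec_base_expansion n b out) := by unfold Spec_base_expansion; infer_instance

-- ===== CLAIM (what is proved, stated in full; the proofs are below) =====
def Claim_equal_base_expansion : Prop := ∀ (n : Int) (b : Int), Dom_base_expansion n b → Pre_base_expansion n b → Spec_base_expansion n b (base_expansion n b)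

-- ===== LEMMAS AND PROOFS =====

-- Loop/recursion correspondence at equal fuel (holds for every input).
theorem baseExpLoopA_eq (b : Int) (fuel : Nat) :
    ∀ (q k : Int) (a : List Int),
      baseExpLoopA b fuel q k a =
        ((baseExpRecB b fuel q).1 ++ a.reverse, k + (baseExpRecB b fuel q).2) := by
  induction fuel with
  | zero => intro q k a; simp [baseExpLoopA, baseExpRecB]
  | succ fuel ih =>
      intro q k a
      by_cases hq : q = 0
      · simp [baseExpLoopA, baseExpRecB, hq]
      · simp only [baseExpLoopA, baseExpRecB, hq, if_neg, ne_eq, not_false_eq_true, if_true, ih]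
        simp
        omega

-- ===== VERDICT (by name: the statement is the Claim_ definition above) =====
theorem base_expansion_spec : Claim_equal_base_expansion := by
  intro n b _ _
  unfold Spec_base_expansion base_expansion base_expansion_alt
  simp [baseExpLoopA_eq]
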